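-- pv_equiv track=rewrite | github.com/linhdvu14/cp-sols | sols/CodeChef/DEC21B/ROPASCI.py | solve
-- ===== SOURCE A (Python) =====
-- WINNER = {'R': 'P', 'P': 'S', 'S': 'R'}
--
-- def solve(N, S):
--     res = ['']*N
--     last = {}
--     for i in range(N-1, -1, -1):
--         c = S[i]
--         p = WINNER[c]
--         res[i] = last[c] = last.get(p, c)
--     return ''.join(res)
-- ===== SOURCE B (Python) =====
-- WINNER = {'R': 'P', 'P': 'S', 'S': 'R'}
--
-- def solve(N, S):
--     # pass 1: nxt[i] = nearest index j > i with S[j] == WINNER[S[i]] (or None)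
--     nxt = [None] * N
--     recent = {}
--     for i in range(N - 1, -1, -1):
--         nxt[i] = recent.get(WINNER[S[i]])
--         recent[S[i]] = i
--     # pass 2: resolve each position through its next-occurrence link
--     res = [''] * N
--     for i in range(N - 1, -1, -1):
--         res[i] = S[i] if nxt[i] is None else res[nxt[i]]
--     return ''.join(res)
-- ===== Notes on version B (the rewrite author's own statement) =====
-- stated objective: alternative
-- what changed: Replaces A's single backward pass with a rolling result-dict by two differently-shaped backward passes: first an explicit next-occurrence index table (nxt[i] = nearest j>i with S[j]==WINNER[S[i]]), then a pass that resolves res[i] = S[i] or res[nxt[i]] through the table.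
import Mathlib
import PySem

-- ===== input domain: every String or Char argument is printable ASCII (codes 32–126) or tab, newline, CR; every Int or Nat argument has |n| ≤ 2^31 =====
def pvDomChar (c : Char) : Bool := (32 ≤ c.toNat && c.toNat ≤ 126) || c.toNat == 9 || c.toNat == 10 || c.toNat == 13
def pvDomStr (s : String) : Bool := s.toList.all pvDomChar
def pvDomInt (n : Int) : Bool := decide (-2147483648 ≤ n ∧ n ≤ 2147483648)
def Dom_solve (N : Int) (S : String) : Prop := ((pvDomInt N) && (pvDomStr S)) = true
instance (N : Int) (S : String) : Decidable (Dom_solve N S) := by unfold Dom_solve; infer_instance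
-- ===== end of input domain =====

-- B replaces A's single backward pass with a rolling result-dict by two backward passes:
-- an explicit next-occurrence index table, then a pass resolving each position through its link
-- (alternative decomposition, same cost).

-- ===== PORT A =====
def pvWINNER : PySem.Dict Char Char := PySem.Dict.ofList [('R', 'P'), ('P', 'S'), ('S', 'R')]

def solve (N : Int) (S : String) : String :=
  let cs := S.toList
  let st := (PySem.List.pyRange (N - 1) (-1) (-1)).foldl
    (fun (st : List String × PySem.Dict Char String) i =>
      let c := (PySem.List.pyGet? cs i).getD ' '
      let p := (pvWINNER.get? c).getD c
      let v := st.2.getD p (String.ofList [c])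
      (st.1.set i.toNat v, st.2.insert c v))
    (List.replicate N.toNat "", PySem.Dict.empty)
  PySem.Str.join "" st.1

-- ===== PORT B =====
def solve_alt (N : Int) (S : String) : String :=
  let cs := S.toList
  -- pass 1: nxt[i] = nearest index j > i with cs[j] = WINNER[cs[i]] (or none)
  let nxt := ((PySem.List.pyRange (N - 1) (-1) (-1)).foldl
    (fun (st : List (Option Int) × PySem.Dict Char Int) i =>
      let c := (PySem.List.pyGet? cs i).getD ' '
      (st.1.set i.toNat (st.2.get? ((pvWINNER.get? c).getD c)), st.2.insert c i))
    (List.replicate N.toNat none, PySem.Dict.empty)).1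
  -- pass 2: resolve each position through its next-occurrence link
  let res := (PySem.List.pyRange (N - 1) (-1) (-1)).foldl
    (fun (res : List String) i =>
      match PySem.List.pyGetD nxt i none with
      | none => res.set i.toNat (String.ofList [(PySem.List.pyGet? cs i).getD ' '])
      | some j => res.set i.toNat (PySem.List.pyGetD res j ""))
    (List.replicate N.toNat "")
  PySem.Str.join "" res

-- ===== PRECONDITION & SPEC =====
-- Pre_ excludes exactly the inputs on which the Python A raises: N larger than len(S)
-- (IndexError) or a character other than 'R'/'P'/'S' among the first N characters (KeyError).
def Pre_solve (N : Int) (S : String) : Prop :=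
  N ≤ (S.toList.length : Int) ∧
    (S.toList.take N.toNat).all (fun c => c == 'R' || c == 'P' || c == 'S') = true
instance (N : Int) (S : String) : Decidable (Pre_solve N S) := by unfold Pre_solve; infer_instance

def pvWitness_solve : Int × String := (3, "RPS")

def Spec_solve (N : Int) (S : String) (out : String) : Prop := out = solve_alt N S
instance (N : Int) (S : String) (out : String) : Decidable (Spec_solve N S out) := by unfold Spec_solve; infer_instance

-- ===== CLAIM (what is proved, stated in full; the proofs are below) =====
def Claim_equal_solve : Prop := ∀ (N : Int) (S : String), Dom_solve N S → Pre_solve N S → Spec_solve N S (solve N S)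

-- ===== LEMMAS AND PROOFS =====

-- [↑(n-1), ↑(n-2), …, ↑m] : the Int indices a backward pass visits, most-significant first
def pvDown (n m : Nat) : List Int := ((List.range' m (n - m)).reverse).map (fun k => (k : Int))

-- generic "set res[i] and update a rolling state" loop: emitted values and final state
def pvSpec {σ α : Type} (f : σ → Int → α × σ) : List Int → σ → List α
  | [], _ => []
  | i :: rest, s => (f s i).1 :: pvSpec f rest (f s i).2

def pvState {σ α : Type} (f : σ → Int → α × σ) : List Int → σ → σ
  | [], s => s
  | i :: rest, s => pvState f rest (f s i).2

def pvE (cs : List Char) (i : Int) : Char := (PySem.List.pyGet? cs i).getD ' '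
def pvW (c : Char) : Char := (pvWINNER.get? c).getD c

-- step of A's loop (emitted value, updated dict)
def pvFA (cs : List Char) (d : PySem.Dict Char String) (i : Int) : String × PySem.Dict Char String :=
  (d.getD (pvW (pvE cs i)) (String.ofList [pvE cs i]),
   d.insert (pvE cs i) (d.getD (pvW (pvE cs i)) (String.ofList [pvE cs i])))

-- step of B's first loop
def pvFN (cs : List Char) (d : PySem.Dict Char Int) (i : Int) : Option Int × PySem.Dict Char Int :=
  (d.get? (pvW (pvE cs i)), d.insert (pvE cs i) i)

-- A's final result list, and B's final nxt table
def pvValsR (cs : List Char) (n : Nat) : List String :=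
  (pvSpec (pvFA cs) (pvDown n 0) PySem.Dict.empty).reverse
def pvNxtR (cs : List Char) (n : Nat) : List (Option Int) :=
  (pvSpec (pvFN cs) (pvDown n 0) PySem.Dict.empty).reverse

theorem pvSpec_append {σ α : Type} (f : σ → Int → α × σ) (L M : List Int) (s : σ) :
    pvSpec f (L ++ M) s = pvSpec f L s ++ pvSpec f M (pvState f L s) := by
  induction L generalizing s with
  | nil => simp [pvSpec, pvState]
  | cons i t ih => simp [pvSpec, pvState, ih]

theorem pvState_append {σ α : Type} (f : σ → Int → α × σ) (L M : List Int) (s : σ) :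
    pvState f (L ++ M) s = pvState f M (pvState f L s) := by
  induction L generalizing s with
  | nil => simp [pvState]
  | cons i t ih => simp [pvState, ih]

theorem pvSpec_length {σ α : Type} (f : σ → Int → α × σ) (L : List Int) (s : σ) :
    (pvSpec f L s).length = L.length := by
  induction L generalizing s with
  | nil => simp [pvSpec]
  | cons i t ih => simp [pvSpec, ih]

theorem pvDown_len (n m : Nat) : (pvDown n m).length = n - m := by simp [pvDown]

theorem pvDown_self (n : Nat) : pvDown n n = [] := by simp [pvDown]

theorem pvDown_cons (m : Nat) : pvDown (m + 1) 0 = (m : Int) :: pvDown m 0 := by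
  simp [pvDown, ← List.range_eq_range', List.range_succ]

theorem pvDown_append (k m n : Nat) (hk : k ≤ m) (hm : m ≤ n) :
    pvDown n k = pvDown n m ++ pvDown m k := by
  unfold pvDown
  have h : List.range' k (m - k) ++ List.range' m (n - m) = List.range' k (n - k) := by
    have h2 := List.range'_append_1 (s := k) (m := m - k) (n := n - m)
    rw [show k + (m - k) = m by omega] at h2
    rw [h2]; congr 1; omega
  rw [← h]; simp

theorem pvDown_snoc (m n : Nat) (h : m < n) : pvDown n m = pvDown n (m + 1) ++ [(m : Int)] := by
  rw [pvDown_append m (m + 1) n (by omega) (by omega)]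
  congr 1
  unfold pvDown
  rw [show m + 1 - m = 1 by omega]
  simp [List.range'_one]

theorem pvFold {σ α : Type} (f : σ → Int → α × σ) :
    ∀ (m : Nat) (res : List α) (s : σ), m ≤ res.length →
    (pvDown m 0).foldl (fun st i => (st.1.set i.toNat (f st.2 i).1, (f st.2 i).2)) (res, s)
    = ((pvSpec f (pvDown m 0) s).reverse ++ res.drop m, pvState f (pvDown m 0) s) := by
  intro m
  induction m with
  | zero => intro res s _; simp [pvDown, pvSpec, pvState]
  | succ m ih =>
    intro res s h
    rw [pvDown_cons]
    simp only [List.foldl_cons]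
    rw [ih (res.set (m : Int).toNat (f s (m : Int)).1) (f s (m : Int)).2 (by simp; omega)]
    have hm : ((m : Int)).toNat = m := rfl
    have hlt : m < res.length := by omega
    have hdrop : (res.set m (f s (m : Int)).1).drop m = (f s (m : Int)).1 :: res.drop (m + 1) := by
      rw [List.drop_eq_getElem_cons (by simp [hlt])]
      rw [List.drop_set_of_lt (by omega)]
      congr 1
      simp [List.getElem_set_self]
    rw [hm, hdrop]
    simp [pvSpec, pvState]

theorem pvSetBoundary {α : Type} (x v : α) :
    ∀ (m : Nat) (T : List α), (List.replicate (m + 1) x ++ T).set m v = List.replicate m x ++ v :: T := by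
  intro m
  induction m with
  | zero => intro T; simp [List.replicate_succ]
  | succ m ih =>
    intro T
    have h : List.replicate (m + 1 + 1) x ++ T = x :: (List.replicate (m + 1) x ++ T) := by
      simp [List.replicate_succ]
    rw [h, List.set_cons_succ, ih, List.replicate_succ, List.cons_append]

theorem pvGetDMid {α : Type} (L1 : List α) (x : α) (L2 : List α) (d : α) :
    (L1 ++ x :: L2).getD L1.length d = x := by
  simp [List.getD_eq_getElem?_getD]

theorem pvRevEntry {α : Type} (L : List α) (i : Nat) (hi : i < L.length) (d : α) :
    L.reverse.getD i d = L.getD (L.length - 1 - i) d := by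
  simp [List.getD_eq_getElem?_getD, List.getElem?_reverse (by simpa using hi)]

theorem pvSpecEntry {σ α : Type} (f : σ → Int → α × σ) (n i : Nat) (hi : i < n) (d : α) (s₀ : σ) :
    (pvSpec f (pvDown n 0) s₀).getD (n - 1 - i) d
    = (f (pvState f (pvDown n (i + 1)) s₀) (i : Int)).1 := by
  rw [pvDown_append 0 (i + 1) n (by omega) (by omega), pvDown_cons, pvSpec_append]
  have hlen : (pvSpec f (pvDown n (i + 1)) s₀).length = n - 1 - i := by
    rw [pvSpec_length, pvDown_len]; omega
  rw [show pvSpec f ((i : Int) :: pvDown i 0) (pvState f (pvDown n (i + 1)) s₀)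
      = (f (pvState f (pvDown n (i + 1)) s₀) (i : Int)).1
        :: pvSpec f (pvDown i 0) (f (pvState f (pvDown n (i + 1)) s₀) (i : Int)).2 from rfl]
  rw [← hlen, pvGetDMid]

theorem pvValsR_len (cs : List Char) (n : Nat) : (pvValsR cs n).length = n := by
  simp [pvValsR, pvSpec_length, pvDown_len]

theorem pvValsREntry (cs : List Char) (n m : Nat) (hm : m < n) :
    (pvValsR cs n).getD m ""
    = (pvFA cs (pvState (pvFA cs) (pvDown n (m + 1)) PySem.Dict.empty) (m : Int)).1 := by
  unfold pvValsR
  rw [pvRevEntry _ m (by rw [pvSpec_length, pvDown_len]; omega)]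
  rw [pvSpec_length, pvDown_len]
  rw [show n - 0 - 1 - m = n - 1 - m by omega]
  exact pvSpecEntry (pvFA cs) n m hm "" PySem.Dict.empty

theorem pvNxtREntry (cs : List Char) (n m : Nat) (hm : m < n) :
    (pvNxtR cs n).getD m none
    = (pvState (pvFN cs) (pvDown n (m + 1)) PySem.Dict.empty).get? (pvW (pvE cs (m : Int))) := by
  unfold pvNxtR
  rw [pvRevEntry _ m (by rw [pvSpec_length, pvDown_len]; omega)]
  rw [pvSpec_length, pvDown_len]
  rw [show n - 0 - 1 - m = n - 1 - m by omega]
  exact pvSpecEntry (pvFN cs) n m hm none PySem.Dict.empty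

-- the key invariant relating A's rolling dict of values with B's dict of most-recent indices
theorem pvInv (cs : List Char) (n : Nat) :
    ∀ (k m : Nat), m + k = n →
    (∀ x j, (pvState (pvFN cs) (pvDown n m) PySem.Dict.empty).get? x = some j →
        (m : Int) ≤ j ∧ j < (n : Int) ∧ pvE cs j = x) ∧
    (∀ x, (pvState (pvFA cs) (pvDown n m) PySem.Dict.empty).get? x
        = ((pvState (pvFN cs) (pvDown n m) PySem.Dict.empty).get? x).map
            (fun j => (pvValsR cs n).getD j.toNat "")) := by
  intro k
  induction k with
  | zero =>
    intro m hm
    have : m = n := by omega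
    subst this
    rw [pvDown_self]
    constructor
    · intro x j hj; simp [pvState] at hj
    · intro x; simp [pvState]
  | succ k ih =>
    intro m hm
    have hmn : m < n := by omega
    obtain ⟨ihN, ihA⟩ := ih (m + 1) (by omega)
    rw [pvDown_snoc m n hmn, pvState_append, pvState_append]
    have hv : (pvFA cs (pvState (pvFA cs) (pvDown n (m + 1)) PySem.Dict.empty) (m : Int)).1
        = (pvValsR cs n).getD m "" := (pvValsREntry cs n m hmn).symm
    constructor
    · intro x j hj
      simp only [pvState, pvFN] at hj
      rw [PySem.Dict.get?_insert] at hj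
      split at hj
      · rename_i hx
        cases hj
        exact ⟨le_refl _, by omega, hx.symm⟩
      · obtain ⟨h1, h2, h3⟩ := ihN x j hj
        exact ⟨by omega, h2, h3⟩
    · intro x
      simp only [pvState, pvFN, pvFA]
      rw [PySem.Dict.get?_insert, PySem.Dict.get?_insert]
      split
      · rename_i hx
        simp only [Option.map_some]
        rw [show ((m : Int)).toNat = m from rfl, ← hv]
        rfl
      · exact ihA x

theorem pvPass2 (cs : List Char) (n : Nat) :
    ∀ (k m : Nat), m + k = n →
    (pvDown n m).foldl
      (fun res i =>
        match PySem.List.pyGetD (pvNxtR cs n) i none with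
        | none => res.set i.toNat (String.ofList [(PySem.List.pyGet? cs i).getD ' '])
        | some j => res.set i.toNat (PySem.List.pyGetD res j ""))
      (List.replicate n "")
    = List.replicate m "" ++ (pvValsR cs n).drop m := by
  intro k
  induction k with
  | zero =>
    intro m hm
    have hmn : m = n := by omega
    rw [hmn, pvDown_self]
    simp only [List.foldl_nil]
    rw [List.drop_eq_nil_of_le (le_of_eq (pvValsR_len cs n)), List.append_nil]
  | succ k ih =>
    intro m hm
    have hmn : m < n := by omega
    rw [pvDown_snoc m n hmn, List.foldl_append, ih (m + 1) (by omega)]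
    simp only [List.foldl_cons, List.foldl_nil]
    obtain ⟨ihN, ihA⟩ := pvInv cs n k (m + 1) (by omega)
    have hnxt : PySem.List.pyGetD (pvNxtR cs n) (m : Int) none
        = (pvState (pvFN cs) (pvDown n (m + 1)) PySem.Dict.empty).get? (pvW (pvE cs (m : Int))) := by
      rw [PySem.List.pyGetD_natCast, pvNxtREntry cs n m hmn]
    have hval : (pvValsR cs n).getD m ""
        = ((pvState (pvFA cs) (pvDown n (m + 1)) PySem.Dict.empty)).getD
            (pvW (pvE cs (m : Int))) (String.ofList [pvE cs (m : Int)]) := by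
      rw [pvValsREntry cs n m hmn]; rfl
    have hdropm : (pvValsR cs n).drop m = (pvValsR cs n).getD m "" :: (pvValsR cs n).drop (m + 1) := by
      have hvlen : m < (pvValsR cs n).length := by rw [pvValsR_len]; omega
      rw [List.drop_eq_getElem_cons hvlen]
      congr 1
      rw [List.getD_eq_getElem?_getD, List.getElem?_eq_getElem hvlen]
      rfl
    rw [hnxt]
    cases hcase : (pvState (pvFN cs) (pvDown n (m + 1)) PySem.Dict.empty).get? (pvW (pvE cs (m : Int))) with
    | none =>
      have h1 : (pvValsR cs n).getD m "" = String.ofList [pvE cs (m : Int)] := by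
        rw [hval, PySem.Dict.getD_eq_get?_getD, ihA, hcase]; rfl
      simp only []
      rw [show ((m : Int)).toNat = m from rfl, pvSetBoundary, hdropm, h1]
      rfl
    | some j =>
      obtain ⟨hj1, hj2, _⟩ := ihN _ j hcase
      have hjn : j.toNat < n := by omega
      have hjm : m + 1 ≤ j.toNat := by omega
      have h2 : PySem.List.pyGetD (List.replicate (m + 1) "" ++ (pvValsR cs n).drop (m + 1)) j ""
          = (pvValsR cs n).getD j.toNat "" := by
        rw [show j = ((j.toNat : Nat) : Int) by omega, PySem.List.pyGetD_natCast]
        simp only [List.getD_eq_getElem?_getD]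
        rw [List.getElem?_append_right (by simp; omega)]
        simp only [List.length_replicate]
        rw [List.getElem?_drop]
        rw [show m + 1 + (j.toNat - (m + 1)) = j.toNat by omega]
        simp only [Int.toNat_natCast]
      have h1 : (pvValsR cs n).getD m "" = (pvValsR cs n).getD j.toNat "" := by
        rw [hval, PySem.Dict.getD_eq_get?_getD, ihA, hcase]; rfl
      simp only []
      rw [h2, show ((m : Int)).toNat = m from rfl, pvSetBoundary, hdropm, h1]

theorem pvRange_eq_aux : ∀ (n : Nat), PySem.List.pyRange ((n : Int) - 1) (-1) (-1) = pvDown n 0 := by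
  intro n
  induction n with
  | zero => rw [PySem.List.pyRange_neg_one_eq_nil (by omega)]; simp [pvDown]
  | succ n ih =>
    rw [show ((n + 1 : Nat) : Int) - 1 = (n : Int) by push_cast; ring]
    rw [PySem.List.pyRange_neg_one_cons (by omega), ih, pvDown_cons]

theorem pvRange_eq (N : Int) : PySem.List.pyRange (N - 1) (-1) (-1) = pvDown N.toNat 0 := by
  by_cases h : N ≤ 0
  · rw [PySem.List.pyRange_neg_one_eq_nil (by omega)]
    rw [show N.toNat = 0 by omega]
    simp [pvDown]
  · rw [show N = ((N.toNat : Nat) : Int) by omega, Int.toNat_natCast]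
    exact pvRange_eq_aux N.toNat

theorem solveA_eq (N : Int) (S : String) :
    solve N S = PySem.Str.join "" (pvValsR S.toList N.toNat) := by
  have h1 : solve N S = PySem.Str.join ""
      (((PySem.List.pyRange (N - 1) (-1) (-1)).foldl
        (fun (st : List String × PySem.Dict Char String) i =>
          (st.1.set i.toNat (pvFA S.toList st.2 i).1, (pvFA S.toList st.2 i).2))
        (List.replicate N.toNat "", PySem.Dict.empty)).1) := rfl
  rw [h1, pvRange_eq, pvFold (pvFA S.toList) N.toNat _ _ (by simp)]
  simp [pvValsR]

theorem solveB_eq (N : Int) (S : String) :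
    solve_alt N S = PySem.Str.join "" (pvValsR S.toList N.toNat) := by
  have h1 : solve_alt N S = PySem.Str.join ""
      ((PySem.List.pyRange (N - 1) (-1) (-1)).foldl
        (fun res i =>
          match PySem.List.pyGetD
              (((PySem.List.pyRange (N - 1) (-1) (-1)).foldl
                (fun (st : List (Option Int) × PySem.Dict Char Int) i =>
                  (st.1.set i.toNat (pvFN S.toList st.2 i).1, (pvFN S.toList st.2 i).2))
                (List.replicate N.toNat none, PySem.Dict.empty)).1) i none with
          | none => res.set i.toNat (String.ofList [(PySem.List.pyGet? S.toList i).getD ' '])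
          | some j => res.set i.toNat (PySem.List.pyGetD res j ""))
        (List.replicate N.toNat "")) := rfl
  rw [h1, pvRange_eq, pvFold (pvFN S.toList) N.toNat _ _ (by simp)]
  have hnxt : ((pvSpec (pvFN S.toList) (pvDown N.toNat 0) PySem.Dict.empty).reverse
      ++ (List.replicate N.toNat (none : Option Int)).drop N.toNat) = pvNxtR S.toList N.toNat := by
    simp [pvNxtR]
  rw [hnxt, pvPass2 S.toList N.toNat N.toNat 0 (by omega)]
  simp

-- ===== VERDICT (by name: the statement is the Claim_ definition above) =====
theorem solve_spec : Claim_equal_solve := by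
  intro N S _ _
  unfold Spec_solve
  rw [solveA_eq, solveB_eq]
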